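-- pv_equiv track=rewrite | github.com/Kiril-Lazarov/Math-programs | Goldbach`s conjecture/primes_and_mean_numbers.py | count_missing_numbers
-- ===== SOURCE A (Python) =====
-- def count_missing_numbers(primes_list_vec):
--     curr_mean_numbers = {}
--     last_prime = primes_list_vec[-1][0]
--     for ll in primes_list_vec:
--         if len(ll) > 1:
--             mean_nums = [ll[0] + ll[i] for i in range(1, len(ll[:]))]
--             all_nums = list(range(mean_nums[0], last_prime + 1))
--             missing_nums_count = len(set(mean_nums).symmetric_difference(all_nums))
--             curr_mean_numbers[ll[0]] = missing_nums_count
--     curr_mean_numbers[last_prime] = 0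
--
--     return curr_mean_numbers
-- ===== SOURCE B (Python) =====
-- def count_missing_numbers(primes_list_vec):
--     result = {}
--     last_prime = primes_list_vec[-1][0]
--     hi = last_prime + 1
--     for ll in primes_list_vec:
--         if len(ll) > 1:
--             first = ll[0] + ll[1]
--             sums = {ll[0] + x for x in ll[1:]}
--             range_len = hi - first if first < hi else 0
--             inter = sum(1 for v in sums if first <= v < hi)
--             result[ll[0]] = len(sums) + range_len - 2 * inter
--     result[last_prime] = 0
--     return result
-- ===== Notes on version B (the rewrite author's own statement) =====
-- stated objective: alternative
-- what changed: B computes the symmetric-difference size arithmetically as |S| + |range| - 2*|S∩range| by counting the set's elements that fall inside the range, never materializing the range list or the symmetric-difference set.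
import Mathlib
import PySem

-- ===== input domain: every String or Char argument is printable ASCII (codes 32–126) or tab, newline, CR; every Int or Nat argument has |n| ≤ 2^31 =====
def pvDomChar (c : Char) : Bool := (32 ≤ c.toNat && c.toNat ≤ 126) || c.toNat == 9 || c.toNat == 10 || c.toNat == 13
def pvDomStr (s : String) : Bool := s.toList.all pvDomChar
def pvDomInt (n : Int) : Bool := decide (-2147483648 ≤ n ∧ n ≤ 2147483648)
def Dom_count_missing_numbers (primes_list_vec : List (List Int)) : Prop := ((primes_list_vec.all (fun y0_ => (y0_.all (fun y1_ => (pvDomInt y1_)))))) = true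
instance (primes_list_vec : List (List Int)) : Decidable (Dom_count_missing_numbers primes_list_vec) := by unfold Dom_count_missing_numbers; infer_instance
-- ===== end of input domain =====

-- B replaces A's materialized range and symmetric-difference set by the arithmetic count
-- |S| + |range| - 2*|S ∩ range|; equivalence of the return value is proved on Pre_ (A raises outside it).

-- ===== PORT A =====
def count_missing_numbers (primes_list_vec : List (List Int)) : List (Int × Int) :=
  -- primes_list_vec[-1][0]; pyGetD totalizes the two indexings (Pre_ excludes the IndexError inputs)
  let last_prime := PySem.List.pyGetD (PySem.List.pyGetD primes_list_vec (-1) []) 0 0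
  let d := primes_list_vec.foldl (fun (d : PySem.Dict Int Int) ll =>
    if 1 < ll.length then
      let mean_nums := (PySem.List.pyRange 1 (ll.length : Int) 1).map
        (fun i => PySem.List.pyGetD ll 0 0 + PySem.List.pyGetD ll i 0)
      let all_nums := PySem.List.pyRange (PySem.List.pyGetD mean_nums 0 0) (last_prime + 1) 1
      -- set(mean_nums).symmetric_difference(all_nums): exact as a set; only its len is used
      let missing_nums_count : Int :=
        (PySem.Set.len (PySem.Set.symmDiff (PySem.Set.ofList mean_nums) (PySem.Set.ofList all_nums)) : Int)
      d.insert (PySem.List.pyGetD ll 0 0) missing_nums_count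
    else d) PySem.Dict.empty
  (d.insert last_prime 0).items

-- ===== PORT B =====
def count_missing_numbers_alt (primes_list_vec : List (List Int)) : List (Int × Int) :=
  let last_prime := PySem.List.pyGetD (PySem.List.pyGetD primes_list_vec (-1) []) 0 0
  let hi := last_prime + 1
  let d := primes_list_vec.foldl (fun (d : PySem.Dict Int Int) ll =>
    if 1 < ll.length then
      let first := PySem.List.pyGetD ll 0 0 + PySem.List.pyGetD ll 1 0
      let sums := PySem.Set.ofList
        ((PySem.List.slice ll (some 1) none).map (fun x => PySem.List.pyGetD ll 0 0 + x))
      let range_len : Int := if first < hi then hi - first else 0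
      -- sum(1 for v in sums if first <= v < hi): order-independent count over the set
      let inter : Int := sums.foldl (fun acc v => if first ≤ v ∧ v < hi then acc + 1 else acc) 0
      d.insert (PySem.List.pyGetD ll 0 0) ((PySem.Set.len sums : Int) + range_len - 2 * inter)
    else d) PySem.Dict.empty
  (d.insert last_prime 0).items

-- ===== PRECONDITION & SPEC =====
-- A raises IndexError when the vector is empty or its last list is empty; Pre_ excludes exactly those.
def Pre_count_missing_numbers (primes_list_vec : List (List Int)) : Prop :=
  primes_list_vec.getLastD [] ≠ []
instance (primes_list_vec : List (List Int)) : Decidable (Pre_count_missing_numbers primes_list_vec) := by unfold Pre_count_missing_numbers; infer_instance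
def pvWitness_count_missing_numbers : List (List Int) := [[2], [3, 5, 7], [11]]
def Spec_count_missing_numbers (primes_list_vec : List (List Int)) (out : List (Int × Int)) : Prop := out = count_missing_numbers_alt primes_list_vec
instance (primes_list_vec : List (List Int)) (out : List (Int × Int)) : Decidable (Spec_count_missing_numbers primes_list_vec out) := by unfold Spec_count_missing_numbers; infer_instance

-- ===== CLAIM (what is proved, stated in full; the proofs are below) =====
def Claim_equal_count_missing_numbers : Prop := ∀ (primes_list_vec : List (List Int)), Dom_count_missing_numbers primes_list_vec → Pre_count_missing_numbers primes_list_vec → Spec_count_missing_numbers primes_list_vec (count_missing_numbers primes_list_vec)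

-- ===== LEMMAS AND PROOFS =====

theorem count_core (S : List Int) (hS : S.Nodup) (f hi : Int) :
  ((PySem.Set.symmDiff S (PySem.Set.ofList (PySem.List.pyRange f hi 1))).length : Int)
  = (S.length : Int) + (if f < hi then hi - f else 0)
    - 2 * (S.foldl (fun acc v => if f ≤ v ∧ v < hi then acc + 1 else acc) (0 : Int)) := by
  set R := PySem.List.pyRange f hi 1 with hRdef
  have hR : R.Nodup := PySem.List.nodup_pyRange_one f hi
  have hRof : PySem.Set.ofList R = R := PySem.Set.ofList_eq_self_of_nodup R hR
  rw [hRof]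
  have hfold : S.foldl (fun acc v => if f ≤ v ∧ v < hi then acc + 1 else acc) (0 : Int)
      = 0 + (S.countP (fun v => decide (f ≤ v ∧ v < hi)) : Int) :=
    PySem.List.foldl_ite_add_one _ _ _
  rw [hfold]
  have hsymm : PySem.Set.symmDiff S R = PySem.Set.diff S R ++ PySem.Set.diff R S := rfl
  rw [hsymm, List.length_append]
  -- toFinset cards
  have hd1 : (PySem.Set.diff S R).toFinset = S.toFinset \ R.toFinset := by
    ext x; simp [PySem.Set.mem_diff]
  have hd2 : (PySem.Set.diff R S).toFinset = R.toFinset \ S.toFinset := by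
    ext x; simp [PySem.Set.mem_diff]
  have hn1 : (PySem.Set.diff S R).Nodup := PySem.Set.nodup_diff S R hS
  have hn2 : (PySem.Set.diff R S).Nodup := PySem.Set.nodup_diff R S hR
  have hl1 : (PySem.Set.diff S R).length = (S.toFinset \ R.toFinset).card := by
    rw [← hd1, List.toFinset_card_of_nodup hn1]
  have hl2 : (PySem.Set.diff R S).length = (R.toFinset \ S.toFinset).card := by
    rw [← hd2, List.toFinset_card_of_nodup hn2]
  have hcS : S.toFinset.card = S.length := List.toFinset_card_of_nodup hS
  have hcR : R.toFinset.card = R.length := List.toFinset_card_of_nodup hR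
  have hlenR : R.length = (hi - f).toNat := PySem.List.length_pyRange_one f hi
  have hcd1 : (S.toFinset \ R.toFinset).card + (S.toFinset ∩ R.toFinset).card = S.toFinset.card :=
    Finset.card_sdiff_add_card_inter _ _
  have hcd2 : (R.toFinset \ S.toFinset).card + (R.toFinset ∩ S.toFinset).card = R.toFinset.card :=
    Finset.card_sdiff_add_card_inter _ _
  have hicomm : (R.toFinset ∩ S.toFinset) = (S.toFinset ∩ R.toFinset) := Finset.inter_comm _ _
  -- countP = card of intersection
  have hcount : S.countP (fun v => decide (f ≤ v ∧ v < hi)) = (S.toFinset ∩ R.toFinset).card := by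
    rw [List.countP_eq_length_filter]
    have hnf : (S.filter (fun v => decide (f ≤ v ∧ v < hi))).Nodup := hS.filter _
    rw [← List.toFinset_card_of_nodup hnf]
    congr 1
    ext x
    simp [hRdef, PySem.List.mem_pyRange_one]
  rw [hcount] at *
  rw [hicomm] at hcd2
  have hif : (if f < hi then hi - f else 0) = ((hi - f).toNat : Int) := by
    split_ifs with h <;> omega
  rw [hif]
  push_cast
  omega

theorem per_step_eq (lp : Int) (d : PySem.Dict Int Int) (ll : List Int) :
  (if 1 < ll.length then
      let mean_nums := (PySem.List.pyRange 1 (ll.length : Int) 1).map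
        (fun i => PySem.List.pyGetD ll 0 0 + PySem.List.pyGetD ll i 0)
      let all_nums := PySem.List.pyRange (PySem.List.pyGetD mean_nums 0 0) (lp + 1) 1
      let missing_nums_count : Int :=
        (PySem.Set.len (PySem.Set.symmDiff (PySem.Set.ofList mean_nums) (PySem.Set.ofList all_nums)) : Int)
      d.insert (PySem.List.pyGetD ll 0 0) missing_nums_count
    else d)
  =
  (if 1 < ll.length then
      let first := PySem.List.pyGetD ll 0 0 + PySem.List.pyGetD ll 1 0
      let sums := PySem.Set.ofList
        ((PySem.List.slice ll (some 1) none).map (fun x => PySem.List.pyGetD ll 0 0 + x))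
      let range_len : Int := if first < lp + 1 then lp + 1 - first else 0
      let inter : Int := sums.foldl (fun acc v => if first ≤ v ∧ v < lp + 1 then acc + 1 else acc) 0
      d.insert (PySem.List.pyGetD ll 0 0) ((PySem.Set.len sums : Int) + range_len - 2 * inter)
    else d) := by
  split_ifs with h
  · obtain ⟨a, t0, rfl⟩ : ∃ a t0, ll = a :: t0 := by
      cases ll with | nil => simp at h | cons a t0 => exact ⟨a, t0, rfl⟩
    obtain ⟨b, t, rfl⟩ : ∃ b t, t0 = b :: t := by
      cases t0 with | nil => simp at h | cons b t => exact ⟨b, t, rfl⟩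
    have hmean : (PySem.List.pyRange 1 ((a :: b :: t).length : Int) 1).map
        (fun i => PySem.List.pyGetD (a :: b :: t) 0 0 + PySem.List.pyGetD (a :: b :: t) i 0)
        = (b :: t).map (fun x => a + x) := by
      have h1 : (PySem.List.pyRange 1 ((a :: b :: t).length : Int) 1).map
          (fun j => PySem.List.pyGetD (a :: b :: t) j 0) = (a :: b :: t).drop 1 :=
        by apply PySem.List.map_pyGetD_pyRange'; omega
      calc (PySem.List.pyRange 1 ((a :: b :: t).length : Int) 1).map
            (fun i => PySem.List.pyGetD (a :: b :: t) 0 0 + PySem.List.pyGetD (a :: b :: t) i 0)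
          = ((PySem.List.pyRange 1 ((a :: b :: t).length : Int) 1).map
            (fun j => PySem.List.pyGetD (a :: b :: t) j 0)).map
            (fun x => PySem.List.pyGetD (a :: b :: t) 0 0 + x) := by
            rw [List.map_map]; rfl
        _ = (b :: t).map (fun x => a + x) := by
            rw [h1]; simp [PySem.List.pyGetD_zero_cons]
    simp only [hmean, PySem.List.slice_from_one]
    have hg0 : PySem.List.pyGetD (a :: b :: t) 0 0 = a := PySem.List.pyGetD_zero_cons a (b :: t) 0
    have hg1 : PySem.List.pyGetD (a :: b :: t) 1 0 = b := by
      simp [pysem]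
    rw [hg0, hg1]
    have hhead : PySem.List.pyGetD ((b :: t).map (fun x => a + x)) 0 0 = a + b :=
      PySem.List.pyGetD_zero_cons _ _ _
    rw [hhead]
    simp only [List.tail_cons]
    congr 1
    exact count_core _ (PySem.Set.nodup_ofList _) (a + b) (lp + 1)
  · rfl

-- ===== VERDICT (by name: the statement is the Claim_ definition above) =====
theorem count_missing_numbers_spec : Claim_equal_count_missing_numbers := by
  intro v _ _
  unfold Spec_count_missing_numbers count_missing_numbers count_missing_numbers_alt
  simp only []
  congr 2
  apply List.foldl_ext
  intro d ll _
  exact per_step_eq _ d ll
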